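-- pv_equiv track=rewrite | github.com/Luweren/ChessZIlla | evaluate.py | evaluate_position_of_a_piece_art1
-- ===== SOURCE A (Python) =====
-- def evaluate_position_of_a_piece_art1(pieces, piece_square_table):
--     evaluation = 0
--     while pieces != 0:
--         square = pieces & -pieces  # Get the least significant set bit         #having pieces = 0b1010 and applying & -pieces => we will get square = 0b10  => the next stored piece in the bitboard
--         #index = bin(square).count('0') - 1          #another way to calculate index. I do not think that it is faster
--         index = 0
--         while square & 1 == 0:
--             square >>= 1
--             index += 1
--         evaluation += piece_square_table[index]
--         pieces &= pieces - 1  # Clear the least significant set bit      #pieces = 0b1010;   pieces -1 == 0b1001;    pieces & pieces -1 == 0b1000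
--
--     return evaluation
-- ===== SOURCE B (Python) =====
-- def evaluate_position_of_a_piece_art1(pieces, piece_square_table):
--     result = 0
--     for i in range(pieces.bit_length()):
--         if (pieces >> i) & 1:
--             result += piece_square_table[i]
--     return result
-- ===== Notes on version B (the rewrite author's own statement) =====
-- stated objective: simpler
-- what changed: Replaced the lowest-set-bit isolation (pieces & -pieces), trailing-zero inner while-loop and clear-bit update with a single flat scan over bit positions 0..bit_length-1 that tests each bit directly.
import Mathlib
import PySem

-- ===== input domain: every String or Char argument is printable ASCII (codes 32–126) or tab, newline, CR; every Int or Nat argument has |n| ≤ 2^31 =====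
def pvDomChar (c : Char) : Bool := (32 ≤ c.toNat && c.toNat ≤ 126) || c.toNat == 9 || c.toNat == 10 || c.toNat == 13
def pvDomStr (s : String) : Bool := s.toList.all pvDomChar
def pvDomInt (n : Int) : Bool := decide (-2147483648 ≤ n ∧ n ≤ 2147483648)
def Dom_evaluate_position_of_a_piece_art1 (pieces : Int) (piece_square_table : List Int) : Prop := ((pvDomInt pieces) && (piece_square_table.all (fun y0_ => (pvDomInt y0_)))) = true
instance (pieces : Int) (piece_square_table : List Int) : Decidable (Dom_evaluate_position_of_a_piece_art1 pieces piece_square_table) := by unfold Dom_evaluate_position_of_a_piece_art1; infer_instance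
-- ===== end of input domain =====

-- B replaces A's lowest-set-bit isolation (& -pieces) with nested trailing-zero loop by one
-- flat scan over bit positions 0..bit_length-1 testing each bit (simpler decomposition).


-- ===== PORT A =====
-- inner `while square & 1 == 0` loop; fuel `square.toNat` suffices (trailing zeros t < 2^t)
def pvInnerA (square : Int) (index : Int) (fuel : Nat) : Int × Int :=
  match fuel with
  | 0 => (square, index)
  | f + 1 =>
    if Int.land square 1 = 0 then pvInnerA (Int.shiftRight square 1) (index + 1) f
    else (square, index)

-- outer `while pieces != 0` loop; fuel `pieces.toNat` suffices (#iterations = popcount ≤ pieces)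
def pvLoopA (pieces : Int) (tbl : List Int) (evaluation : Int) (fuel : Nat) : Int :=
  match fuel with
  | 0 => evaluation
  | f + 1 =>
    if pieces ≠ 0 then
      let square := Int.land pieces (-pieces)
      let index := (pvInnerA square 0 square.toNat).2
      let evaluation := evaluation + (PySem.List.pyGet? tbl index).getD 0
      pvLoopA (Int.land pieces (pieces - 1)) tbl evaluation f
    else evaluation

def evaluate_position_of_a_piece_art1 (pieces : Int) (piece_square_table : List Int) : Int :=
  pvLoopA pieces piece_square_table 0 pieces.toNat

-- ===== PORT B =====
-- Python's int.bit_length for a nonnegative value (B is only claimed on Pre_, where pieces ≥ 0)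
def pyBitLength (m : Nat) : Nat :=
  if hz : m = 0 then 0 else pyBitLength (m / 2) + 1
termination_by m
decreasing_by exact Nat.div_lt_self (Nat.pos_of_ne_zero hz) one_lt_two

def evaluate_position_of_a_piece_art1_alt (pieces : Int) (piece_square_table : List Int) : Int :=
  (List.range (pyBitLength pieces.natAbs)).foldl
    (fun result i =>
      if Int.land (Int.shiftRight pieces i) 1 ≠ 0 then
        result + (PySem.List.pyGet? piece_square_table (i : Int)).getD 0
      else result) 0

-- ===== PRECONDITION & SPEC =====
-- Pre_ excludes pieces < 0 (A's while loop never terminates there) and pieces ≥ 2^len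
-- (A raises IndexError at the first set bit beyond the table; B raises there too).
def Pre_evaluate_position_of_a_piece_art1 (pieces : Int) (piece_square_table : List Int) : Prop :=
  0 ≤ pieces ∧ pieces < 2 ^ piece_square_table.length
instance (pieces : Int) (piece_square_table : List Int) : Decidable (Pre_evaluate_position_of_a_piece_art1 pieces piece_square_table) := by unfold Pre_evaluate_position_of_a_piece_art1; infer_instance

def pvWitness_evaluate_position_of_a_piece_art1 : Int × List Int := (5, [1, 2, 3])

def Spec_evaluate_position_of_a_piece_art1 (pieces : Int) (piece_square_table : List Int) (out : Int) : Prop := out = evaluate_position_of_a_piece_art1_alt pieces piece_square_table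
instance (pieces : Int) (piece_square_table : List Int) (out : Int) : Decidable (Spec_evaluate_position_of_a_piece_art1 pieces piece_square_table out) := by unfold Spec_evaluate_position_of_a_piece_art1; infer_instance

-- ===== CLAIM (what is proved, stated in full; the proofs are below) =====
def Claim_equal_evaluate_position_of_a_piece_art1 : Prop := ∀ (pieces : Int) (piece_square_table : List Int), Dom_evaluate_position_of_a_piece_art1 pieces piece_square_table → Pre_evaluate_position_of_a_piece_art1 pieces piece_square_table → Spec_evaluate_position_of_a_piece_art1 pieces piece_square_table (evaluate_position_of_a_piece_art1 pieces piece_square_table)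

-- ===== LEMMAS AND PROOFS =====

-- reference function: binary-digit recursion both ports are reduced to
def pvS (tbl : List Int) (m : Nat) : Int :=
  if hz : m = 0 then 0
  else (if m % 2 = 1 then (PySem.List.pyGet? tbl 0).getD 0 else 0) + pvS tbl.tail (m / 2)
termination_by m
decreasing_by exact Nat.div_lt_self (Nat.pos_of_ne_zero hz) one_lt_two

theorem pvS_zero (tbl : List Int) : pvS tbl 0 = 0 := by rw [pvS]; simp

theorem pvS_pos (tbl : List Int) (m : Nat) (h : m ≠ 0) :
    pvS tbl m = (if m % 2 = 1 then (PySem.List.pyGet? tbl 0).getD 0 else 0) + pvS tbl.tail (m / 2) := by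
  rw [pvS]; simp [h]

-- Nat bit identities
theorem pv_land_odd (k : Nat) : (2 * k + 1) &&& (2 * k) = 2 * k := by
  apply Nat.eq_of_testBit_eq
  intro i
  cases i with
  | zero =>
    rw [Nat.testBit_land]
    simp only [Nat.testBit_zero]
    have h1 : (2 * k + 1) % 2 = 1 := by omega
    have h2 : (2 * k) % 2 = 0 := by omega
    simp [h1, h2]
  | succ j =>
    rw [Nat.testBit_land]
    simp only [Nat.testBit_succ]
    have h1 : (2 * k + 1) / 2 = k := by omega
    have h2 : (2 * k) / 2 = k := by omega
    rw [h1, h2, Bool.and_self]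

theorem pv_ldiff_odd (k : Nat) : (2 * k + 1).ldiff (2 * k) = 1 := by
  apply Nat.eq_of_testBit_eq
  intro i
  cases i with
  | zero =>
    rw [Nat.testBit_ldiff]
    simp only [Nat.testBit_zero]
    have h1 : (2 * k + 1) % 2 = 1 := by omega
    have h2 : (2 * k) % 2 = 0 := by omega
    simp [h1, h2]
  | succ j =>
    rw [Nat.testBit_ldiff]
    simp only [Nat.testBit_succ]
    have h1 : (2 * k + 1) / 2 = k := by omega
    have h2 : (2 * k) / 2 = k := by omega
    have h3 : (1 : Nat) / 2 = 0 := by norm_num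
    rw [h1, h2, h3]
    simp

theorem pv_land_even (k : Nat) (hk : 0 < k) :
    (2 * k) &&& (2 * k - 1) = 2 * (k &&& (k - 1)) := by
  apply Nat.eq_of_testBit_eq
  intro i
  cases i with
  | zero =>
    rw [Nat.testBit_land]
    simp only [Nat.testBit_zero]
    have h1 : (2 * k) % 2 = 0 := by omega
    have h2 : (2 * (k &&& (k - 1))) % 2 = 0 := by omega
    simp [h1, h2]
  | succ j =>
    rw [Nat.testBit_land]
    simp only [Nat.testBit_succ]
    have h1 : (2 * k) / 2 = k := by omega
    have h2 : (2 * k - 1) / 2 = k - 1 := by omega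
    have h3 : (2 * (k &&& (k - 1))) / 2 = k &&& (k - 1) := by omega
    rw [h1, h2, h3, Nat.testBit_land]

theorem pv_ldiff_even (k : Nat) (hk : 0 < k) :
    (2 * k).ldiff (2 * k - 1) = 2 * (k.ldiff (k - 1)) := by
  apply Nat.eq_of_testBit_eq
  intro i
  cases i with
  | zero =>
    rw [Nat.testBit_ldiff]
    simp only [Nat.testBit_zero]
    have h1 : (2 * k) % 2 = 0 := by omega
    have h2 : (2 * (k.ldiff (k - 1))) % 2 = 0 := by omega
    simp [h1, h2]
  | succ j =>
    rw [Nat.testBit_ldiff]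
    simp only [Nat.testBit_succ]
    have h1 : (2 * k) / 2 = k := by omega
    have h2 : (2 * k - 1) / 2 = k - 1 := by omega
    have h3 : (2 * (k.ldiff (k - 1))) / 2 = k.ldiff (k - 1) := by omega
    rw [h1, h2, h3, Nat.testBit_ldiff]

theorem pv_ldiff_pow (m : Nat) (hm : 0 < m) : ∃ t, m.ldiff (m - 1) = 2 ^ t ∧ 2 ^ t ≤ m := by
  induction m using Nat.strong_induction_on with
  | _ m IH =>
    rcases Nat.even_or_odd m with ⟨k, hk⟩ | ⟨k, hk⟩
    · subst hk
      have hk0 : 0 < k := by omega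
      obtain ⟨t, ht, hle⟩ := IH k (by omega) hk0
      refine ⟨t + 1, ?_, ?_⟩
      · rw [show k + k = 2 * k by ring, pv_ldiff_even k hk0, ht, pow_succ]; ring
      · rw [pow_succ]; omega
    · subst hk
      exact ⟨0, by rw [show 2 * k + 1 - 1 = 2 * k by omega, pv_ldiff_odd, pow_zero], by omega⟩

-- Int/Nat bridging (definitional)
theorem pv_cast_land (a b : Nat) : Int.land (↑a) (↑b) = ↑(a &&& b) := rfl
theorem pv_cast_shift (a : Nat) (n : Nat) : Int.shiftRight (↑a) n = ↑(a >>> n) := rfl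
theorem pv_cast_land_neg (k : Nat) : Int.land (↑(k + 1)) (-(↑(k + 1) : Int)) = ↑((k + 1).ldiff k) := rfl

-- inner loop computes trailing zeros of a power of two
theorem pv_inner_pow (t : Nat) : ∀ (fuel : Nat) (i : Int), t < fuel →
    (pvInnerA (((2 ^ t : Nat) : Int)) i fuel).2 = i + t := by
  induction t with
  | zero =>
    intro fuel i h
    match fuel with
    | f + 1 =>
      rw [pvInnerA]
      norm_num
      rw [if_neg (by decide)]
  | succ s IH =>
    intro fuel i h
    match fuel, h with
    | f + 1, h =>
      have heven : Int.land (((2 ^ (s + 1) : Nat) : Int)) 1 = 0 := by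
        rw [show (1 : Int) = ((1 : Nat) : Int) from rfl, pv_cast_land, Nat.and_one_is_mod]
        simp [Nat.pow_succ, Nat.mul_mod_left]
      have hshift : Int.shiftRight (((2 ^ (s + 1) : Nat) : Int)) 1 = ((2 ^ s : Nat) : Int) := by
        rw [pv_cast_shift]
        norm_num [Nat.shiftRight_one, Nat.pow_succ]
      rw [pvInnerA, if_pos heven, hshift, IH f (i + 1) (by omega)]
      push_cast
      ring

-- accumulator shift for the outer loop
theorem pv_loopA_acc (fuel : Nat) : ∀ (p : Int) (tbl : List Int) (a : Int),
    pvLoopA p tbl a fuel = a + pvLoopA p tbl 0 fuel := by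
  induction fuel with
  | zero => intro p tbl a; simp [pvLoopA]
  | succ f IH =>
    intro p tbl a
    by_cases hp : p ≠ 0
    · rw [pvLoopA, pvLoopA]
      simp only [if_pos hp]
      rw [IH _ _ (a + _), IH _ _ (0 + _)]
      ring
    · rw [pvLoopA, pvLoopA]
      simp only [if_neg hp]
      ring

theorem pv_pyGet_succ (tbl : List Int) (t : Nat) :
    PySem.List.pyGet? tbl ((t : Int) + 1) = PySem.List.pyGet? tbl.tail (t : Int) := by
  cases tbl with
  | nil => simp [PySem.List.pyGet?, PySem.List.pyIdx?]
  | cons x xs =>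
    rw [show ((t : Int) + 1) = ((t + 1 : Nat) : Int) by push_cast; ring]
    rw [PySem.List.pyGet?_natCast, PySem.List.pyGet?_natCast]
    simp

-- the outer loop on an even value equals the loop on its half with the table shifted
theorem pv_loopA_even (fuel : Nat) : ∀ (k : Nat) (tbl : List Int) (a : Int),
    pvLoopA (↑(2 * k)) tbl a fuel = pvLoopA (↑k) tbl.tail a fuel := by
  induction fuel with
  | zero => intro k tbl a; simp [pvLoopA]
  | succ f IH =>
    intro k tbl a
    rcases Nat.eq_zero_or_pos k with hk | hk
    · subst hk; simp [pvLoopA]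
    · obtain ⟨t, ht, hle⟩ := pv_ldiff_pow k hk
      have hsqL : Int.land (↑(2 * k)) (-(↑(2 * k) : Int)) = ((2 ^ (t + 1) : Nat) : Int) := by
        rw [show 2 * k = (2 * k - 1) + 1 by omega, pv_cast_land_neg,
            show (2 * k - 1) + 1 = 2 * k by omega, pv_ldiff_even k hk, ht]
        exact congrArg _ (by rw [Nat.pow_succ, Nat.mul_comm])
      have hsqR : Int.land (↑k) (-(↑k : Int)) = ((2 ^ t : Nat) : Int) := by
        rw [show k = (k - 1) + 1 by omega, pv_cast_land_neg,
            show (k - 1) + 1 = k by omega, ht]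
      have hnxL : Int.land (↑(2 * k)) ((↑(2 * k) : Int) - 1) = ↑(2 * (k &&& (k - 1))) := by
        rw [show ((↑(2 * k) : Int) - 1) = ((2 * k - 1 : Nat) : Int) by push_cast; omega,
            pv_cast_land, pv_land_even k hk]
      have hnxR : Int.land (↑k) ((↑k : Int) - 1) = ↑(k &&& (k - 1)) := by
        rw [show ((↑k : Int) - 1) = ((k - 1 : Nat) : Int) by omega, pv_cast_land]
      have hL2k : ((2 * k : Nat) : Int) ≠ 0 := Nat.cast_ne_zero.mpr (by omega)
      have hLk : ((k : Nat) : Int) ≠ 0 := Nat.cast_ne_zero.mpr (by omega)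
      rw [pvLoopA, pvLoopA]
      simp only [if_pos hL2k, if_pos hLk, hsqL, hsqR, hnxL, hnxR]
      rw [Int.toNat_natCast, Int.toNat_natCast]
      rw [pv_inner_pow (t + 1) (2 ^ (t + 1)) 0 Nat.lt_two_pow_self,
          pv_inner_pow t (2 ^ t) 0 Nat.lt_two_pow_self]
      rw [show (0 : Int) + ((t + 1 : Nat) : Int) = ((t : Nat) : Int) + 1 by push_cast [Nat.cast_add]; ring,
          show (0 : Int) + ((t : Nat) : Int) = ((t : Nat) : Int) by ring]
      rw [pv_pyGet_succ]
      exact IH (k &&& (k - 1)) tbl _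

-- A's loop equals the reference recursion
theorem pv_loopA_eq_pvS (m : Nat) : ∀ (tbl : List Int) (fuel : Nat), m ≤ fuel →
    pvLoopA (↑m) tbl 0 fuel = pvS tbl m := by
  induction m using Nat.strong_induction_on with
  | _ m IH =>
    intro tbl fuel hfuel
    rcases Nat.eq_zero_or_pos m with hm | hm
    · subst hm
      cases fuel with
      | zero => simp [pvLoopA, pvS_zero]
      | succ f => simp [pvLoopA, pvS_zero]
    · rcases Nat.even_or_odd m with ⟨k, hk⟩ | ⟨k, hk⟩
      · -- even: m = 2k
        have hk' : m = 2 * k := by omega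
        subst hk'
        have hk0 : 0 < k := by omega
        rw [pv_loopA_even fuel k tbl 0, IH k (by omega) tbl.tail fuel (by omega),
            pvS_pos tbl (2 * k) (by omega)]
        rw [show (2 * k) % 2 = 0 by omega]
        rw [show (2 * k) / 2 = k by omega]
        norm_num
      · -- odd: m = 2k+1
        subst hk
        match fuel, hfuel with
        | f + 1, hfuel =>
          have hm0 : ((2 * k + 1 : Nat) : Int) ≠ 0 := Nat.cast_ne_zero.mpr (by omega)
          have hsq : Int.land (↑(2 * k + 1)) (-(↑(2 * k + 1) : Int)) = ((2 ^ 0 : Nat) : Int) := by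
            rw [pv_cast_land_neg, pv_ldiff_odd]
            norm_num
          have hnx : Int.land (↑(2 * k + 1)) ((↑(2 * k + 1) : Int) - 1) = ↑(2 * k) := by
            rw [show ((↑(2 * k + 1) : Nat) : Int) - 1 = ((2 * k : Nat) : Int) by push_cast; ring,
                pv_cast_land, pv_land_odd]
          rw [pvLoopA]
          simp only [if_pos hm0, hsq, hnx]
          rw [Int.toNat_natCast, pv_inner_pow 0 (2 ^ 0) 0 Nat.lt_two_pow_self]
          rw [show (0 : Int) + ((0 : Nat) : Int) = (0 : Int) by norm_num]
          rw [pv_loopA_acc f _ tbl _]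
          rw [pv_loopA_even f k tbl 0, IH k (by omega) tbl.tail f (by omega)]
          rw [pvS_pos tbl (2 * k + 1) (by omega)]
          rw [show (2 * k + 1) % 2 = 1 by omega]
          rw [show (2 * k + 1) / 2 = k by omega]
          simp only [if_true]
          ring

-- generic accumulator shift for B's fold
theorem pv_foldB_acc (g : Int → Nat → Int) (hg : ∀ a i, g a i = a + g 0 i) :
    ∀ (l : List Nat) (a : Int), l.foldl g a = a + l.foldl g 0 := by
  intro l
  induction l with
  | nil => intro a; simp
  | cons x xs IH =>
    intro a
    simp only [List.foldl_cons]
    rw [IH (g a x), IH (g 0 x), hg a x]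
    ring

-- B's fold equals the reference recursion
theorem pv_foldB_eq_pvS (m : Nat) : ∀ (tbl : List Int),
    (List.range (pyBitLength m)).foldl
      (fun result i =>
        if Int.land (Int.shiftRight (↑m) i) 1 ≠ 0 then
          result + (PySem.List.pyGet? tbl (i : Int)).getD 0
        else result) 0 = pvS tbl m := by
  induction m using Nat.strong_induction_on with
  | _ m IH =>
    intro tbl
    rcases Nat.eq_zero_or_pos m with hm | hm
    · subst hm
      rw [pyBitLength]
      simp [pvS_zero]
    · have hbl : pyBitLength m = pyBitLength (m / 2) + 1 := by
        rw [pyBitLength]; simp [Nat.pos_iff_ne_zero.mp hm]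
      rw [hbl, List.range_succ_eq_map, List.foldl_cons, List.foldl_map]
      have hfun : (fun (result : Int) (i : Nat) =>
            if Int.land (Int.shiftRight (↑m) (Nat.succ i)) 1 ≠ 0 then
              result + (PySem.List.pyGet? tbl ((Nat.succ i : Nat) : Int)).getD 0
            else result) =
          (fun (result : Int) (i : Nat) =>
            if Int.land (Int.shiftRight (↑(m / 2)) i) 1 ≠ 0 then
              result + (PySem.List.pyGet? tbl.tail ((i : Nat) : Int)).getD 0
            else result) := by
        funext result i
        have hs : Int.shiftRight (↑m) (Nat.succ i) = Int.shiftRight (↑(m / 2)) i := by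
          rw [pv_cast_shift, pv_cast_shift]
          congr 1
          rw [show Nat.succ i = 1 + i by omega, Nat.shiftRight_add, Nat.shiftRight_one]
        have hget : PySem.List.pyGet? tbl ((Nat.succ i : Nat) : Int) =
            PySem.List.pyGet? tbl.tail ((i : Nat) : Int) := by
          rw [show ((Nat.succ i : Nat) : Int) = (i : Int) + 1 by push_cast; ring]
          exact pv_pyGet_succ tbl i
        rw [hs, hget]
      rw [hfun]
      have hacc : ∀ (a : Int) (i : Nat),
          (fun (result : Int) (i : Nat) =>
            if Int.land (Int.shiftRight (↑(m / 2)) i) 1 ≠ 0 then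
              result + (PySem.List.pyGet? tbl.tail ((i : Nat) : Int)).getD 0
            else result) a i = a +
          (fun (result : Int) (i : Nat) =>
            if Int.land (Int.shiftRight (↑(m / 2)) i) 1 ≠ 0 then
              result + (PySem.List.pyGet? tbl.tail ((i : Nat) : Int)).getD 0
            else result) 0 i := by
        intro a i
        dsimp only
        by_cases h : Int.land (Int.shiftRight (↑(m / 2)) i) 1 ≠ 0
        · rw [if_pos h, if_pos h]; ring
        · rw [if_neg h, if_neg h]; ring
      rw [pv_foldB_acc _ hacc, IH (m / 2) (Nat.div_lt_self hm one_lt_two) tbl.tail]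
      have hbit0 : (if Int.land (Int.shiftRight ((m : Nat) : Int) 0) 1 ≠ 0 then
          (0 : Int) + (PySem.List.pyGet? tbl ((0 : Nat) : Int)).getD 0 else 0) =
          (if m % 2 = 1 then (PySem.List.pyGet? tbl 0).getD 0 else 0) := by
        rw [pv_cast_shift, show (1 : Int) = ((1 : Nat) : Int) from rfl, pv_cast_land,
            Nat.shiftRight_zero, Nat.and_one_is_mod]
        by_cases h : m % 2 = 1
        · rw [if_pos h]
          simp [h]
        · have h0 : m % 2 = 0 := by omega
          simp [h0]
      rw [pvS_pos tbl m (by omega), hbit0]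

-- ===== VERDICT (by name: the statement is the Claim_ definition above) =====
theorem evaluate_position_of_a_piece_art1_spec : Claim_equal_evaluate_position_of_a_piece_art1 := by
  intro pieces tbl hDom hPre
  unfold Spec_evaluate_position_of_a_piece_art1
  obtain ⟨hnn, _⟩ := hPre
  have hcast : ((pieces.toNat : Nat) : Int) = pieces := Int.toNat_of_nonneg hnn
  rw [← hcast]
  show pvLoopA (↑pieces.toNat) tbl 0 (((pieces.toNat : Nat) : Int)).toNat = _
  rw [Int.toNat_natCast, pv_loopA_eq_pvS pieces.toNat tbl pieces.toNat le_rfl]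
  unfold evaluate_position_of_a_piece_art1_alt
  rw [Int.natAbs_natCast, pv_foldB_eq_pvS pieces.toNat tbl]
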